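-- pv_equiv track=rewrite | github.com/Brcoinlearning/VibeCoding-SOP | orchestrator/src/core/trimmer.py | _prioritize_lines
-- ===== SOURCE A (Python) =====
-- def _prioritize_lines(lines: list[str]) -> list[str]:
--     """
--     按优先级排序行
--
--     Args:
--         lines: 日志行
--
--     Returns:
--         排序后的行
--     """
--     priorities = {
--         'CRITICAL': 0,
--         'ERROR': 1,
--         'Exception': 2,
--         'WARNING': 3,
--         'failed': 4,
--     }
--
--     def get_priority(line: str) -> int:
--         for pattern, priority in priorities.items():
--             if pattern.lower() in line.lower():
--                 return priority
--         return 999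
--
--     return sorted(lines, key=get_priority)
-- ===== SOURCE B (Python) =====
-- def _prioritize_lines(lines: list[str]) -> list[str]:
--     # One stable bucket pass over the 6 fixed priority classes instead of a comparison sort.
--     crit, err, exc, warn, fail, rest = [], [], [], [], [], []
--     for line in lines:
--         low = line.lower()
--         if 'critical' in low:
--             crit.append(line)
--         elif 'error' in low:
--             err.append(line)
--         elif 'exception' in low:
--             exc.append(line)
--         elif 'warning' in low:
--             warn.append(line)
--         elif 'failed' in low:
--             fail.append(line)
--         else:
--             rest.append(line)
--     return crit + err + exc + warn + fail + rest
-- ===== Notes on version B (the rewrite author's own statement) =====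
-- stated objective: faster
-- what changed: Replaces sorted() with key scan (O(n log n) comparison sort) by a single stable bucket pass that appends each line to one of the 6 fixed priority buckets and concatenates them.
import Mathlib
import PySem

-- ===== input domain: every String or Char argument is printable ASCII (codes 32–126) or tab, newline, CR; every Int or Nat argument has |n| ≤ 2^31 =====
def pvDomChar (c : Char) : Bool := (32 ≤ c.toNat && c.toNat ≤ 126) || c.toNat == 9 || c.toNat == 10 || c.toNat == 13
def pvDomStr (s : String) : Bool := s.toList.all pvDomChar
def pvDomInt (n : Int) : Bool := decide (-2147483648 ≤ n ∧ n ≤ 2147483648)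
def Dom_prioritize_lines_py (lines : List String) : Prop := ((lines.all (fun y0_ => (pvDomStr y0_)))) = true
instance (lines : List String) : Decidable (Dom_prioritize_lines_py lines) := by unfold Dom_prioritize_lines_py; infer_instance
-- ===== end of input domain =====

-- B replaces A's sorted()-with-key comparison sort by a single stable bucket pass over the 6 fixed priority classes (faster).

-- ===== PORT A =====
-- the priorities dict, in insertion order
def pvPrioritiesA : List (String × Int) :=
  [("CRITICAL", 0), ("ERROR", 1), ("Exception", 2), ("WARNING", 3), ("failed", 4)]

-- the inner 'for pattern, priority in priorities.items(): if pattern.lower() in line.lower(): return priority' loop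
def pvGetPriority : List (String × Int) → String → Int
  | [], _ => 999
  | (p, pr) :: rest, line =>
      if PySem.Str.isIn (PySem.Str.lower p) (PySem.Str.lower line) then pr
      else pvGetPriority rest line

def prioritize_lines_py (lines : List String) : List String :=
  PySem.List.sorted lines (fun line => pvGetPriority pvPrioritiesA line) false

-- ===== PORT B =====
-- one loop iteration: append the line to the bucket of the first matching pattern
def pvStep (b : List String × List String × List String × List String × List String × List String)
    (line : String) :
    List String × List String × List String × List String × List String × List String :=
  let low := PySem.Str.lower line
  if PySem.Str.isIn "critical" low then (b.1 ++ [line], b.2.1, b.2.2.1, b.2.2.2.1, b.2.2.2.2.1, b.2.2.2.2.2)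
  else if PySem.Str.isIn "error" low then (b.1, b.2.1 ++ [line], b.2.2.1, b.2.2.2.1, b.2.2.2.2.1, b.2.2.2.2.2)
  else if PySem.Str.isIn "exception" low then (b.1, b.2.1, b.2.2.1 ++ [line], b.2.2.2.1, b.2.2.2.2.1, b.2.2.2.2.2)
  else if PySem.Str.isIn "warning" low then (b.1, b.2.1, b.2.2.1, b.2.2.2.1 ++ [line], b.2.2.2.2.1, b.2.2.2.2.2)
  else if PySem.Str.isIn "failed" low then (b.1, b.2.1, b.2.2.1, b.2.2.2.1, b.2.2.2.2.1 ++ [line], b.2.2.2.2.2)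
  else (b.1, b.2.1, b.2.2.1, b.2.2.2.1, b.2.2.2.2.1, b.2.2.2.2.2 ++ [line])

def prioritize_lines_py_alt (lines : List String) : List String :=
  let b := lines.foldl pvStep ([], [], [], [], [], [])
  b.1 ++ b.2.1 ++ b.2.2.1 ++ b.2.2.2.1 ++ b.2.2.2.2.1 ++ b.2.2.2.2.2

-- ===== PRECONDITION & SPEC =====
def Spec_prioritize_lines_py (lines : List String) (out : List String) : Prop := out = prioritize_lines_py_alt lines
instance (lines : List String) (out : List String) : Decidable (Spec_prioritize_lines_py lines out) := by unfold Spec_prioritize_lines_py; infer_instance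

-- ===== CLAIM (what is proved, stated in full; the proofs are below) =====
def Claim_equal_prioritize_lines_py : Prop := ∀ (lines : List String), Dom_prioritize_lines_py lines → Spec_prioritize_lines_py lines (prioritize_lines_py lines)

-- ===== LEMMAS AND PROOFS =====

-- the five substring tests, on the lowered line
def pvC0 (l : String) : Bool := PySem.Str.isIn "critical" (PySem.Str.lower l)
def pvC1 (l : String) : Bool := PySem.Str.isIn "error" (PySem.Str.lower l)
def pvC2 (l : String) : Bool := PySem.Str.isIn "exception" (PySem.Str.lower l)
def pvC3 (l : String) : Bool := PySem.Str.isIn "warning" (PySem.Str.lower l)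
def pvC4 (l : String) : Bool := PySem.Str.isIn "failed" (PySem.Str.lower l)

-- which bucket a line falls into (first match wins)
def pvQ0 (l : String) : Bool := pvC0 l
def pvQ1 (l : String) : Bool := !pvC0 l && pvC1 l
def pvQ2 (l : String) : Bool := !pvC0 l && !pvC1 l && pvC2 l
def pvQ3 (l : String) : Bool := !pvC0 l && !pvC1 l && !pvC2 l && pvC3 l
def pvQ4 (l : String) : Bool := !pvC0 l && !pvC1 l && !pvC2 l && !pvC3 l && pvC4 l
def pvQ5 (l : String) : Bool := !pvC0 l && !pvC1 l && !pvC2 l && !pvC3 l && !pvC4 l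

-- A's key, written as an if-chain
def pvKey (l : String) : Int :=
  if pvC0 l then 0 else if pvC1 l then 1 else if pvC2 l then 2
  else if pvC3 l then 3 else if pvC4 l then 4 else 999

lemma pvKey_eq (l : String) : pvGetPriority pvPrioritiesA l = pvKey l := by
  have h0 : PySem.Str.lower "CRITICAL" = "critical" := by decide
  have h1 : PySem.Str.lower "ERROR" = "error" := by decide
  have h2 : PySem.Str.lower "Exception" = "exception" := by decide
  have h3 : PySem.Str.lower "WARNING" = "warning" := by decide
  have h4 : PySem.Str.lower "failed" = "failed" := by decide
  simp only [pvPrioritiesA, pvGetPriority, h0, h1, h2, h3, h4, pvKey, pvC0, pvC1, pvC2, pvC3, pvC4]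
  rfl

-- the concatenation of the six buckets, as filters
def pvF (lines : List String) : List String :=
  lines.filter pvQ0 ++ lines.filter pvQ1 ++ lines.filter pvQ2 ++
  lines.filter pvQ3 ++ lines.filter pvQ4 ++ lines.filter pvQ5

lemma pvFoldl_step (lines : List String) (a0 a1 a2 a3 a4 a5 : List String) :
    lines.foldl pvStep (a0, a1, a2, a3, a4, a5) =
      (a0 ++ lines.filter pvQ0, a1 ++ lines.filter pvQ1, a2 ++ lines.filter pvQ2,
       a3 ++ lines.filter pvQ3, a4 ++ lines.filter pvQ4, a5 ++ lines.filter pvQ5) := by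
  induction lines generalizing a0 a1 a2 a3 a4 a5 with
  | nil => simp
  | cons x xs ih =>
    simp only [List.foldl_cons, pvStep]
    split_ifs with g0 g1 g2 g3 g4 <;>
      rw [ih] <;>
      simp_all [List.filter_cons, pvQ0, pvQ1, pvQ2, pvQ3, pvQ4, pvQ5, pvC0, pvC1, pvC2, pvC3, pvC4]

lemma pvInsertBy_cons {α : Type} (before : α → α → Bool) (x y : α) (ys : List α) :
    PySem.List.insertBy before x (y :: ys) =
      if before x y then x :: y :: ys else y :: PySem.List.insertBy before x ys := rfl

lemma pvInsertBy_skip {α : Type} (before : α → α → Bool) (x : α) (l1 l2 : List α)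
    (h : ∀ y ∈ l1, before x y = false) :
    PySem.List.insertBy before x (l1 ++ l2) = l1 ++ PySem.List.insertBy before x l2 := by
  induction l1 with
  | nil => rfl
  | cons y ys ih =>
    have hy := h y (by simp)
    simp only [List.cons_append, pvInsertBy_cons, hy, Bool.false_eq_true, if_false]
    rw [ih (fun z hz => h z (by simp [hz]))]

lemma pvInsertBy_front {α : Type} (before : α → α → Bool) (x : α) (l2 : List α)
    (h : ∀ y ∈ l2, before x y = true) :
    PySem.List.insertBy before x l2 = x :: l2 := by
  cases l2 with
  | nil => rfl
  | cons y ys => simp [pvInsertBy_cons, h y (by simp)]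

lemma pvKey_of_q0 {y : String} (h : pvQ0 y = true) : pvKey y = 0 := by
  simp_all [pvQ0, pvKey]
lemma pvKey_of_q1 {y : String} (h : pvQ1 y = true) : pvKey y = 1 := by
  simp_all [pvQ1, pvKey]
lemma pvKey_of_q2 {y : String} (h : pvQ2 y = true) : pvKey y = 2 := by
  simp_all [pvQ2, pvKey]
lemma pvKey_of_q3 {y : String} (h : pvQ3 y = true) : pvKey y = 3 := by
  simp_all [pvQ3, pvKey]
lemma pvKey_of_q4 {y : String} (h : pvQ4 y = true) : pvKey y = 4 := by
  simp_all [pvQ4, pvKey]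
lemma pvKey_of_q5 {y : String} (h : pvQ5 y = true) : pvKey y = 999 := by
  simp_all [pvQ5, pvKey]

-- inserting x into the bucket concatenation puts it at the end of its own bucket
set_option maxHeartbeats 1000000 in
lemma pvInsert_into_F (x : String) (xs : List String) :
    PySem.List.insertBy (fun a b => decide (pvKey a < pvKey b)) x (pvF xs) = pvF (xs ++ [x]) := by
  by_cases g0 : pvC0 x = true
  case pos =>
      have hq : pvQ0 x = true := by simp [pvQ0, g0]
      have hkx : pvKey x = 0 := pvKey_of_q0 hq
      have nq1 : pvQ1 x = false := by simp [pvQ1, g0]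
      have nq2 : pvQ2 x = false := by simp [pvQ2, g0]
      have nq3 : pvQ3 x = false := by simp [pvQ3, g0]
      have nq4 : pvQ4 x = false := by simp [pvQ4, g0]
      have nq5 : pvQ5 x = false := by simp [pvQ5, g0]
      have hfalse : ∀ y ∈ xs.filter pvQ0, (decide (pvKey x < pvKey y) : Bool) = false := by
        intro y hy
        have hky : pvKey y ≤ 0 := by
          have := pvKey_of_q0 (List.mem_filter.1 hy).2; omega
        simp only [hkx, decide_eq_false_iff_not, not_lt]; omega
      have htrue : ∀ y ∈ xs.filter pvQ1 ++ xs.filter pvQ2 ++ xs.filter pvQ3 ++ xs.filter pvQ4 ++ xs.filter pvQ5, (decide (pvKey x < pvKey y) : Bool) = true := by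
        intro y hy
        have hky : 0 < pvKey y := by
          simp only [List.mem_append] at hy
          rcases hy with (((((hy1)|hy2)|hy3)|hy4)|hy5)
          · have := pvKey_of_q1 (List.mem_filter.1 hy1).2; omega
          · have := pvKey_of_q2 (List.mem_filter.1 hy2).2; omega
          · have := pvKey_of_q3 (List.mem_filter.1 hy3).2; omega
          · have := pvKey_of_q4 (List.mem_filter.1 hy4).2; omega
          · have := pvKey_of_q5 (List.mem_filter.1 hy5).2; omega
        simp only [hkx, decide_eq_true_eq]; omega
      have hsplit : pvF xs = (xs.filter pvQ0) ++ (xs.filter pvQ1 ++ xs.filter pvQ2 ++ xs.filter pvQ3 ++ xs.filter pvQ4 ++ xs.filter pvQ5) := by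
        simp [pvF, List.append_assoc]
      rw [hsplit, pvInsertBy_skip _ _ _ _ hfalse, pvInsertBy_front _ _ _ htrue]
      simp [pvF, List.filter_append, List.filter_cons, hq, nq1, nq2, nq3, nq4, nq5, List.append_assoc]
  case neg =>
    simp only [Bool.not_eq_true] at g0
    by_cases g1 : pvC1 x = true
    case pos =>
        have hq : pvQ1 x = true := by simp [pvQ1, g0, g1]
        have hkx : pvKey x = 1 := pvKey_of_q1 hq
        have nq0 : pvQ0 x = false := by simp [pvQ0, g0, g1]
        have nq2 : pvQ2 x = false := by simp [pvQ2, g0, g1]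
        have nq3 : pvQ3 x = false := by simp [pvQ3, g0, g1]
        have nq4 : pvQ4 x = false := by simp [pvQ4, g0, g1]
        have nq5 : pvQ5 x = false := by simp [pvQ5, g0, g1]
        have hfalse : ∀ y ∈ xs.filter pvQ0 ++ xs.filter pvQ1, (decide (pvKey x < pvKey y) : Bool) = false := by
          intro y hy
          have hky : pvKey y ≤ 1 := by
            simp only [List.mem_append] at hy
            rcases hy with ((hy0)|hy1)
            · have := pvKey_of_q0 (List.mem_filter.1 hy0).2; omega
            · have := pvKey_of_q1 (List.mem_filter.1 hy1).2; omega
          simp only [hkx, decide_eq_false_iff_not, not_lt]; omega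
        have htrue : ∀ y ∈ xs.filter pvQ2 ++ xs.filter pvQ3 ++ xs.filter pvQ4 ++ xs.filter pvQ5, (decide (pvKey x < pvKey y) : Bool) = true := by
          intro y hy
          have hky : 1 < pvKey y := by
            simp only [List.mem_append] at hy
            rcases hy with ((((hy2)|hy3)|hy4)|hy5)
            · have := pvKey_of_q2 (List.mem_filter.1 hy2).2; omega
            · have := pvKey_of_q3 (List.mem_filter.1 hy3).2; omega
            · have := pvKey_of_q4 (List.mem_filter.1 hy4).2; omega
            · have := pvKey_of_q5 (List.mem_filter.1 hy5).2; omega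
          simp only [hkx, decide_eq_true_eq]; omega
        have hsplit : pvF xs = (xs.filter pvQ0 ++ xs.filter pvQ1) ++ (xs.filter pvQ2 ++ xs.filter pvQ3 ++ xs.filter pvQ4 ++ xs.filter pvQ5) := by
          simp [pvF, List.append_assoc]
        rw [hsplit, pvInsertBy_skip _ _ _ _ hfalse, pvInsertBy_front _ _ _ htrue]
        simp [pvF, List.filter_append, List.filter_cons, hq, nq0, nq2, nq3, nq4, nq5, List.append_assoc]
    case neg =>
      simp only [Bool.not_eq_true] at g1
      by_cases g2 : pvC2 x = true
      case pos =>
          have hq : pvQ2 x = true := by simp [pvQ2, g0, g1, g2]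
          have hkx : pvKey x = 2 := pvKey_of_q2 hq
          have nq0 : pvQ0 x = false := by simp [pvQ0, g0, g1, g2]
          have nq1 : pvQ1 x = false := by simp [pvQ1, g0, g1, g2]
          have nq3 : pvQ3 x = false := by simp [pvQ3, g0, g1, g2]
          have nq4 : pvQ4 x = false := by simp [pvQ4, g0, g1, g2]
          have nq5 : pvQ5 x = false := by simp [pvQ5, g0, g1, g2]
          have hfalse : ∀ y ∈ xs.filter pvQ0 ++ xs.filter pvQ1 ++ xs.filter pvQ2, (decide (pvKey x < pvKey y) : Bool) = false := by
            intro y hy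
            have hky : pvKey y ≤ 2 := by
              simp only [List.mem_append] at hy
              rcases hy with (((hy0)|hy1)|hy2)
              · have := pvKey_of_q0 (List.mem_filter.1 hy0).2; omega
              · have := pvKey_of_q1 (List.mem_filter.1 hy1).2; omega
              · have := pvKey_of_q2 (List.mem_filter.1 hy2).2; omega
            simp only [hkx, decide_eq_false_iff_not, not_lt]; omega
          have htrue : ∀ y ∈ xs.filter pvQ3 ++ xs.filter pvQ4 ++ xs.filter pvQ5, (decide (pvKey x < pvKey y) : Bool) = true := by
            intro y hy
            have hky : 2 < pvKey y := by
              simp only [List.mem_append] at hy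
              rcases hy with (((hy3)|hy4)|hy5)
              · have := pvKey_of_q3 (List.mem_filter.1 hy3).2; omega
              · have := pvKey_of_q4 (List.mem_filter.1 hy4).2; omega
              · have := pvKey_of_q5 (List.mem_filter.1 hy5).2; omega
            simp only [hkx, decide_eq_true_eq]; omega
          have hsplit : pvF xs = (xs.filter pvQ0 ++ xs.filter pvQ1 ++ xs.filter pvQ2) ++ (xs.filter pvQ3 ++ xs.filter pvQ4 ++ xs.filter pvQ5) := by
            simp [pvF, List.append_assoc]
          rw [hsplit, pvInsertBy_skip _ _ _ _ hfalse, pvInsertBy_front _ _ _ htrue]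
          simp [pvF, List.filter_append, List.filter_cons, hq, nq0, nq1, nq3, nq4, nq5, List.append_assoc]
      case neg =>
        simp only [Bool.not_eq_true] at g2
        by_cases g3 : pvC3 x = true
        case pos =>
            have hq : pvQ3 x = true := by simp [pvQ3, g0, g1, g2, g3]
            have hkx : pvKey x = 3 := pvKey_of_q3 hq
            have nq0 : pvQ0 x = false := by simp [pvQ0, g0, g1, g2, g3]
            have nq1 : pvQ1 x = false := by simp [pvQ1, g0, g1, g2, g3]
            have nq2 : pvQ2 x = false := by simp [pvQ2, g0, g1, g2, g3]
            have nq4 : pvQ4 x = false := by simp [pvQ4, g0, g1, g2, g3]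
            have nq5 : pvQ5 x = false := by simp [pvQ5, g0, g1, g2, g3]
            have hfalse : ∀ y ∈ xs.filter pvQ0 ++ xs.filter pvQ1 ++ xs.filter pvQ2 ++ xs.filter pvQ3, (decide (pvKey x < pvKey y) : Bool) = false := by
              intro y hy
              have hky : pvKey y ≤ 3 := by
                simp only [List.mem_append] at hy
                rcases hy with ((((hy0)|hy1)|hy2)|hy3)
                · have := pvKey_of_q0 (List.mem_filter.1 hy0).2; omega
                · have := pvKey_of_q1 (List.mem_filter.1 hy1).2; omega
                · have := pvKey_of_q2 (List.mem_filter.1 hy2).2; omega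
                · have := pvKey_of_q3 (List.mem_filter.1 hy3).2; omega
              simp only [hkx, decide_eq_false_iff_not, not_lt]; omega
            have htrue : ∀ y ∈ xs.filter pvQ4 ++ xs.filter pvQ5, (decide (pvKey x < pvKey y) : Bool) = true := by
              intro y hy
              have hky : 3 < pvKey y := by
                simp only [List.mem_append] at hy
                rcases hy with ((hy4)|hy5)
                · have := pvKey_of_q4 (List.mem_filter.1 hy4).2; omega
                · have := pvKey_of_q5 (List.mem_filter.1 hy5).2; omega
              simp only [hkx, decide_eq_true_eq]; omega
            have hsplit : pvF xs = (xs.filter pvQ0 ++ xs.filter pvQ1 ++ xs.filter pvQ2 ++ xs.filter pvQ3) ++ (xs.filter pvQ4 ++ xs.filter pvQ5) := by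
              simp [pvF, List.append_assoc]
            rw [hsplit, pvInsertBy_skip _ _ _ _ hfalse, pvInsertBy_front _ _ _ htrue]
            simp [pvF, List.filter_append, List.filter_cons, hq, nq0, nq1, nq2, nq4, nq5, List.append_assoc]
        case neg =>
          simp only [Bool.not_eq_true] at g3
          by_cases g4 : pvC4 x = true
          case pos =>
              have hq : pvQ4 x = true := by simp [pvQ4, g0, g1, g2, g3, g4]
              have hkx : pvKey x = 4 := pvKey_of_q4 hq
              have nq0 : pvQ0 x = false := by simp [pvQ0, g0, g1, g2, g3, g4]
              have nq1 : pvQ1 x = false := by simp [pvQ1, g0, g1, g2, g3, g4]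
              have nq2 : pvQ2 x = false := by simp [pvQ2, g0, g1, g2, g3, g4]
              have nq3 : pvQ3 x = false := by simp [pvQ3, g0, g1, g2, g3, g4]
              have nq5 : pvQ5 x = false := by simp [pvQ5, g0, g1, g2, g3, g4]
              have hfalse : ∀ y ∈ xs.filter pvQ0 ++ xs.filter pvQ1 ++ xs.filter pvQ2 ++ xs.filter pvQ3 ++ xs.filter pvQ4, (decide (pvKey x < pvKey y) : Bool) = false := by
                intro y hy
                have hky : pvKey y ≤ 4 := by
                  simp only [List.mem_append] at hy
                  rcases hy with (((((hy0)|hy1)|hy2)|hy3)|hy4)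
                  · have := pvKey_of_q0 (List.mem_filter.1 hy0).2; omega
                  · have := pvKey_of_q1 (List.mem_filter.1 hy1).2; omega
                  · have := pvKey_of_q2 (List.mem_filter.1 hy2).2; omega
                  · have := pvKey_of_q3 (List.mem_filter.1 hy3).2; omega
                  · have := pvKey_of_q4 (List.mem_filter.1 hy4).2; omega
                simp only [hkx, decide_eq_false_iff_not, not_lt]; omega
              have htrue : ∀ y ∈ xs.filter pvQ5, (decide (pvKey x < pvKey y) : Bool) = true := by
                intro y hy
                have hky : 4 < pvKey y := by
                  have := pvKey_of_q5 (List.mem_filter.1 hy).2; omega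
                simp only [hkx, decide_eq_true_eq]; omega
              have hsplit : pvF xs = (xs.filter pvQ0 ++ xs.filter pvQ1 ++ xs.filter pvQ2 ++ xs.filter pvQ3 ++ xs.filter pvQ4) ++ (xs.filter pvQ5) := by
                simp [pvF, List.append_assoc]
              rw [hsplit, pvInsertBy_skip _ _ _ _ hfalse, pvInsertBy_front _ _ _ htrue]
              simp [pvF, List.filter_append, List.filter_cons, hq, nq0, nq1, nq2, nq3, nq5, List.append_assoc]
          case neg =>
            simp only [Bool.not_eq_true] at g4
            have hq : pvQ5 x = true := by simp [pvQ5, g0, g1, g2, g3, g4]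
            have hkx : pvKey x = 999 := pvKey_of_q5 hq
            have nq0 : pvQ0 x = false := by simp [pvQ0, g0, g1, g2, g3, g4]
            have nq1 : pvQ1 x = false := by simp [pvQ1, g0, g1, g2, g3, g4]
            have nq2 : pvQ2 x = false := by simp [pvQ2, g0, g1, g2, g3, g4]
            have nq3 : pvQ3 x = false := by simp [pvQ3, g0, g1, g2, g3, g4]
            have nq4 : pvQ4 x = false := by simp [pvQ4, g0, g1, g2, g3, g4]
            have hfalse : ∀ y ∈ xs.filter pvQ0 ++ xs.filter pvQ1 ++ xs.filter pvQ2 ++ xs.filter pvQ3 ++ xs.filter pvQ4 ++ xs.filter pvQ5, (decide (pvKey x < pvKey y) : Bool) = false := by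
              intro y hy
              have hky : pvKey y ≤ 999 := by
                simp only [List.mem_append] at hy
                rcases hy with ((((((hy0)|hy1)|hy2)|hy3)|hy4)|hy5)
                · have := pvKey_of_q0 (List.mem_filter.1 hy0).2; omega
                · have := pvKey_of_q1 (List.mem_filter.1 hy1).2; omega
                · have := pvKey_of_q2 (List.mem_filter.1 hy2).2; omega
                · have := pvKey_of_q3 (List.mem_filter.1 hy3).2; omega
                · have := pvKey_of_q4 (List.mem_filter.1 hy4).2; omega
                · have := pvKey_of_q5 (List.mem_filter.1 hy5).2; omega
              simp only [hkx, decide_eq_false_iff_not, not_lt]; omega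
            have hsplit : pvF xs = (xs.filter pvQ0 ++ xs.filter pvQ1 ++ xs.filter pvQ2 ++ xs.filter pvQ3 ++ xs.filter pvQ4 ++ xs.filter pvQ5) ++ [] := by
              simp [pvF, List.append_assoc]
            rw [hsplit, pvInsertBy_skip _ _ _ _ hfalse]
            show (xs.filter pvQ0 ++ xs.filter pvQ1 ++ xs.filter pvQ2 ++ xs.filter pvQ3 ++ xs.filter pvQ4 ++ xs.filter pvQ5) ++ [x] = _
            simp [pvF, List.filter_append, List.filter_cons, hq, nq0, nq1, nq2, nq3, nq4, List.append_assoc]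

lemma pvSorted_eq (lines : List String) :
    PySem.List.sorted lines pvKey false = pvF lines := by
  induction lines using List.reverseRecOn with
  | nil => rfl
  | append_singleton xs x ih =>
    rw [PySem.List.sorted_eq_foldl_insertBy, List.foldl_append, List.foldl_cons, List.foldl_nil,
        ← PySem.List.sorted_eq_foldl_insertBy, ih]
    exact pvInsert_into_F x xs

-- ===== VERDICT (by name: the statement is the Claim_ definition above) =====
theorem prioritize_lines_py_spec : Claim_equal_prioritize_lines_py := by
  intro lines _
  show prioritize_lines_py lines = prioritize_lines_py_alt lines
  have hkey : (fun line => pvGetPriority pvPrioritiesA line) = pvKey := funext pvKey_eq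
  rw [prioritize_lines_py, hkey, pvSorted_eq]
  show pvF lines = prioritize_lines_py_alt lines
  rw [prioritize_lines_py_alt]
  rw [pvFoldl_step]
  simp [pvF]
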